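-- pv_equiv track=rewrite | github.com/sonya3108/190924 | LVL_2_Python_group_2024/Exercise_4.py | total_queue_time
-- ===== SOURCE A (Python) =====
-- import heapq
--
-- def total_queue_time(clients, num_cashes):
--     if len(clients) <= num_cashes:
--         return max(clients)
--
--
--     cashes = [0] * num_cashes
--     heapq.heapify(cashes)
--
--
--     for client_time in clients:
--
--         min_cash = heapq.heappop(cashes)
--
--         heapq.heappush(cashes, min_cash + client_time)
--
--
--     return max(cashes)
-- ===== SOURCE B (Python) =====
-- def total_queue_time(clients, num_cashes):
--     if len(clients) <= num_cashes:
--         return max(clients)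
--     loads = [0] * num_cashes   # kept sorted ascending at all times
--     for t in clients:
--         new = loads.pop(0) + t          # least-loaded cashier is at the front
--         i = 0
--         while i < len(loads) and loads[i] <= new:
--             i += 1
--         loads.insert(i, new)            # re-insert keeping the list sorted
--     return loads[-1]                    # largest load is at the back
-- ===== Notes on version B (the rewrite author's own statement) =====
-- stated objective: alternative
-- what changed: Replaces the heapq priority queue with a sorted-list simulation: loads are kept sorted ascending, the minimum is popped from the front and the updated load is re-inserted in order by a linear insertion scan, so the answer is the last element instead of max().
import Mathlib
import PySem

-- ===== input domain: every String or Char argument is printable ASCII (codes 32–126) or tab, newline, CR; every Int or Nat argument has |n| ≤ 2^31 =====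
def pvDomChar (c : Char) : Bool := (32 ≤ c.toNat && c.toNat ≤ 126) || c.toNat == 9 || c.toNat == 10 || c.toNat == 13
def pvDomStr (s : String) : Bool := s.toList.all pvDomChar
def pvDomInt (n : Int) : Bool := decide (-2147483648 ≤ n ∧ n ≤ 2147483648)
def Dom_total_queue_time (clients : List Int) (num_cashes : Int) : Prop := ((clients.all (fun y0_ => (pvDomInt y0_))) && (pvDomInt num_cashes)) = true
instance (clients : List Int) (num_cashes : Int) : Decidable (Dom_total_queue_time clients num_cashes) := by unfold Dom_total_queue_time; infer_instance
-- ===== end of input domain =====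

-- B replaces A's heapq priority queue by a sorted-list simulation: loads kept sorted ascending,
-- minimum popped from the front, updated load re-inserted in order, answer = last element.
-- Objective: alternative (different data structure of similar cost). A mutates no caller data.


-- ===== PORT A =====
-- heapq is ported at the level of the heap's element multiset (heappop returns and removes the
-- minimum element, heappush adds one): this is exact for every value A observes — the popped
-- minima and the final max — the heap's internal array order is never observed by A.
-- `.getD 0` stands where Python raises (max/min of an empty list; heappop of an empty heap):
-- those inputs are excluded by Pre_total_queue_time.
def total_queue_time (clients : List Int) (num_cashes : Int) : Int :=
  if (clients.length : Int) ≤ num_cashes then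
    (PySem.List.max? clients (fun y => y)).getD 0
  else
    let cashes : List Int := List.replicate num_cashes.toNat 0
    let final := clients.foldl (fun cs client_time =>
      let min_cash := (PySem.List.min? cs (fun y => y)).getD 0   -- heappop's value
      (cs.erase min_cash) ++ [min_cash + client_time]) cashes     -- pop min, push min+t
    (PySem.List.max? final (fun y => y)).getD 0

-- ===== PORT B =====
-- `loads.insert(i, new)` after the while-scan for the first position whose load exceeds `new`:
-- the scan-then-insert pair is the ordered insertion below, step for step.
def pvInsSorted (v : Int) : List Int → List Int
  | [] => [v]
  | x :: xs => if x ≤ v then x :: pvInsSorted v xs else v :: x :: xs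

-- the `[]` branch stands where `loads.pop(0)` raises (IndexError, num_cashes < 1) and
-- `.getD 0` where `loads[-1]` would raise; both only reachable outside Pre_total_queue_time.
def total_queue_time_alt (clients : List Int) (num_cashes : Int) : Int :=
  if (clients.length : Int) ≤ num_cashes then
    (PySem.List.max? clients (fun y => y)).getD 0
  else
    let loads0 : List Int := List.replicate num_cashes.toNat 0
    let final := clients.foldl (fun loads t =>
      match loads with
      | [] => []
      | x :: xs => pvInsSorted (x + t) xs) loads0
    (PySem.List.pyGet? final (-1)).getD 0

-- ===== PRECONDITION & SPEC =====
-- Pre_ excludes exactly the inputs where A raises: empty clients (max of empty sequence →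
-- ValueError) and, when the simulation branch runs, num_cashes < 1 (heappop of an empty heap →
-- IndexError). B raises on exactly the same inputs.
def Pre_total_queue_time (clients : List Int) (num_cashes : Int) : Prop :=
  clients ≠ [] ∧ 1 ≤ num_cashes
instance (clients : List Int) (num_cashes : Int) : Decidable (Pre_total_queue_time clients num_cashes) := by unfold Pre_total_queue_time; infer_instance
def pvWitness_total_queue_time : List Int × Int := ([2, 3, 10], 2)

def Spec_total_queue_time (clients : List Int) (num_cashes : Int) (out : Int) : Prop := out = total_queue_time_alt clients num_cashes
instance (clients : List Int) (num_cashes : Int) (out : Int) : Decidable (Spec_total_queue_time clients num_cashes out) := by unfold Spec_total_queue_time; infer_instance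

-- ===== CLAIM (what is proved, stated in full; the proofs are below) =====
def Claim_equal_total_queue_time : Prop := ∀ (clients : List Int) (num_cashes : Int), Dom_total_queue_time clients num_cashes → Pre_total_queue_time clients num_cashes → Spec_total_queue_time clients num_cashes (total_queue_time clients num_cashes)

-- ===== LEMMAS AND PROOFS =====

-- Ordered insertion is, as a multiset, just adding the element.
theorem pvInsSorted_perm (v : Int) (l : List Int) : (pvInsSorted v l).Perm (v :: l) := by
  induction l with
  | nil => simp [pvInsSorted]
  | cons x xs ih =>
      unfold pvInsSorted
      split
      · exact (ih.cons x).trans (List.Perm.swap v x xs)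
      · exact List.Perm.refl _

-- Ordered insertion preserves sortedness.
theorem pvInsSorted_sorted (v : Int) (l : List Int) (h : l.Pairwise (· ≤ ·)) :
    (pvInsSorted v l).Pairwise (· ≤ ·) := by
  induction l with
  | nil => simp [pvInsSorted]
  | cons x xs ih =>
      rw [List.pairwise_cons] at h
      unfold pvInsSorted
      split
      · rename_i hxv
        rw [List.pairwise_cons]
        refine ⟨fun b hb => ?_, ih h.2⟩
        rcases List.mem_cons.mp ((pvInsSorted_perm v xs).mem_iff.mp hb) with hbv | hb
        · omega
        · exact h.1 b hb
      · rename_i hxv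
        rw [List.pairwise_cons]
        refine ⟨fun b hb => ?_, (List.pairwise_cons).mpr h⟩
        rcases List.mem_cons.mp hb with hbx | hb
        · omega
        · exact le_trans (by omega) (h.1 b hb)

-- The minimum VALUE of a multiset permuted to a sorted nonempty list is that list's head.
theorem pv_min?_of_perm_sorted (cs : List Int) (x : Int) (xs : List Int)
    (hp : cs.Perm (x :: xs)) (hs : (x :: xs).Pairwise (· ≤ ·)) :
    PySem.List.min? cs (fun y => y) = some x := by
  cases hm : PySem.List.min? cs (fun y => y) with
  | none =>
      rw [PySem.List.min?_eq_none_iff] at hm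
      subst hm
      exact absurd (List.nil_perm.mp hp) (by simp)
  | some m =>
      have hmem : m ∈ x :: xs := hp.mem_iff.mp (PySem.List.min?_mem hm)
      have hle : m ≤ x := PySem.List.min?_isMin hm x (hp.mem_iff.mpr (by simp))
      rw [List.pairwise_cons] at hs
      rcases List.mem_cons.mp hmem with hmx | hmem
      · simp [hmx]
      · have := hs.1 m hmem; simp only [Option.some.injEq]; omega

-- The maximum VALUE of a multiset permuted to a sorted list ending in y is y.
theorem pv_max?_of_perm_sorted (cs l : List Int) (y : Int)
    (hp : cs.Perm (l ++ [y])) (hs : (l ++ [y]).Pairwise (· ≤ ·)) :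
    PySem.List.max? cs (fun z => z) = some y := by
  cases hm : PySem.List.max? cs (fun z => z) with
  | none =>
      rw [PySem.List.max?_eq_none_iff] at hm
      subst hm
      exact absurd (List.nil_perm.mp hp) (by simp)
  | some m =>
      have hmem : m ∈ l ++ [y] := hp.mem_iff.mp (PySem.List.max?_mem hm)
      have hle : y ≤ m := PySem.List.max?_isMax hm y (hp.mem_iff.mpr (by simp))
      have hub : m ≤ y := by
        rcases List.mem_append.mp hmem with hml | hmy
        · have := (List.pairwise_append).mp hs
          exact this.2.2 m hml y (by simp)
        · simp at hmy; omega
      simp only [Option.some.injEq]; omega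

-- Loop invariant: A's multiset state and B's sorted state stay permuted; B's state nonempty.
theorem pv_fold_inv (clients : List Int) (cs l : List Int)
    (hp : cs.Perm l) (hs : l.Pairwise (· ≤ ·)) (hne : l ≠ []) :
    (clients.foldl (fun cs t =>
        let m := (PySem.List.min? cs (fun y => y)).getD 0
        (cs.erase m) ++ [m + t]) cs).Perm
      (clients.foldl (fun loads t =>
        match loads with
        | [] => []
        | x :: xs => pvInsSorted (x + t) xs) l)
    ∧ (clients.foldl (fun loads t =>
        match loads with
        | [] => []
        | x :: xs => pvInsSorted (x + t) xs) l).Pairwise (· ≤ ·)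
    ∧ (clients.foldl (fun loads t =>
        match loads with
        | [] => []
        | x :: xs => pvInsSorted (x + t) xs) l) ≠ [] := by
  induction clients generalizing cs l with
  | nil => exact ⟨hp, hs, hne⟩
  | cons t rest ih =>
      obtain ⟨x, xs, rfl⟩ := List.exists_cons_of_ne_nil hne
      simp only [List.foldl_cons]
      have hmin : PySem.List.min? cs (fun y => y) = some x := pv_min?_of_perm_sorted cs x xs hp hs
      have hstep : ((cs.erase x) ++ [x + t]).Perm (pvInsSorted (x + t) xs) := by
        have h1 : (cs.erase x).Perm xs := by
          have := hp.erase x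
          simpa [List.erase_cons_head] using this
        exact ((h1.append_right [x + t]).trans (List.perm_append_singleton _ _)).trans
          (pvInsSorted_perm (x + t) xs).symm
      have hs' : (pvInsSorted (x + t) xs).Pairwise (· ≤ ·) :=
        pvInsSorted_sorted _ _ ((List.pairwise_cons.mp hs).2)
      have hne' : pvInsSorted (x + t) xs ≠ [] := by
        intro h
        have := pvInsSorted_perm (x + t) xs
        rw [h] at this
        exact absurd (List.nil_perm.mp this) (by simp)
      simpa only [hmin, Option.getD_some] using ih _ _ hstep hs' hne'

-- ===== VERDICT (by name: the statement is the Claim_ definition above) =====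
theorem total_queue_time_spec : Claim_equal_total_queue_time := by
  intro clients num_cashes _ hpre
  obtain ⟨hne, hk⟩ := hpre
  unfold Spec_total_queue_time total_queue_time total_queue_time_alt
  split
  · rfl
  · have hrep : (List.replicate num_cashes.toNat (0 : Int)) ≠ [] := by
      simp [List.replicate_eq_nil_iff]; omega
    have hsort : (List.replicate num_cashes.toNat (0 : Int)).Pairwise (· ≤ ·) :=
      List.pairwise_replicate_of_refl
    obtain ⟨hperm, hs, hne'⟩ := pv_fold_inv clients _ _ (List.Perm.refl _) hsort hrep
    simp only []
    have hdec := (List.dropLast_append_getLast hne').symm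
    rw [hdec] at hperm hs
    rw [pv_max?_of_perm_sorted _ _ _ hperm hs, PySem.List.pyGet?_neg_one,
      List.getLast?_eq_some_getLast hne']
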